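-- pv_equiv track=rewrite | github.com/take-works-tech/arc-agi2-arc2025 | scripts/analysis/analyze_object_duplication_patterns.py | analyze_object_duplication_patterns
-- ===== SOURCE A (Python) =====
-- from typing import List, Dict, Any, Tuple, Optional
--
-- def analyze_object_duplication_patterns(objects: List[Dict[str, Any]]) -> Dict[str, int]:
--     """オブジェクト間の複製パターンを分析
--
--     各オブジェクトが「既存のオブジェクトと同じ色と形状」「既存のオブジェクトと同じ形状（色は異なる）」
--     「新規生成」のいずれかに分類されるかを判定します。
--     最初のオブジェクトは常に「新規生成」として扱います。
--     """
--     if len(objects) == 0: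
--         return {
--             'same_color_and_shape': 0,
--             'same_shape_only': 0,
--             'new_generation': 0,
--             'total_objects': 0
--         }
--
--     same_color_and_shape_count = 0
--     same_shape_only_count = 0
--     new_generation_count = 1  # 最初のオブジェクトは常に新規生成
--
--     # 最初のオブジェクトはスキップ（常に新規生成として扱う）
--     seen_shapes_and_colors = {}  # {(shape_sig, color): count}
--     seen_shapes = {}  # {shape_sig: [colors]}
--
--     first_obj = objects[0]
--     first_shape_sig = first_obj.get('shape_signature')
--     first_color = first_obj.get('color')
--
--     if first_shape_sig is not None:
--         seen_shapes_and_colors[(first_shape_sig, first_color)] = 1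
--         seen_shapes[first_shape_sig] = [first_color]
--
--     # 2番目以降のオブジェクトを分析
--     for i in range(1, len(objects)):
--         obj = objects[i]
--         shape_sig = obj.get('shape_signature')
--         color = obj.get('color')
--
--         if shape_sig is None:
--             # 形状シグネチャが取得できない場合は新規生成として扱う
--             new_generation_count += 1
--             continue
--
--         # 既存のオブジェクトと同じ色と形状かチェック
--         if (shape_sig, color) in seen_shapes_and_colors:
--             # 同じ色と形状をコピー
--             same_color_and_shape_count += 1
--             seen_shapes_and_colors[(shape_sig, color)] += 1
--         # 既存のオブジェクトと同じ形状（色は異なる）かチェック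
--         elif shape_sig in seen_shapes:
--             # 同じ形状で色のみ変更
--             same_shape_only_count += 1
--             if color not in seen_shapes[shape_sig]:
--                 seen_shapes[shape_sig].append(color)
--             seen_shapes_and_colors[(shape_sig, color)] = seen_shapes_and_colors.get((shape_sig, color), 0) + 1
--         else:
--             # 新規生成（形状も色も異なる）
--             new_generation_count += 1
--             seen_shapes[shape_sig] = [color]
--             seen_shapes_and_colors[(shape_sig, color)] = 1
--
--     total_objects = len(objects)
--
--     return {
--         'same_color_and_shape': same_color_and_shape_count,
--         'same_shape_only': same_shape_only_count,
--         'new_generation': new_generation_count,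
--         'total_objects': total_objects
--     }
-- ===== SOURCE B (Python) =====
-- def analyze_object_duplication_patterns(objects):
--     """Single-pass aggregate counting; results by closed-form arithmetic."""
--     pairs = set()
--     shapes = set()
--     none_count = 0
--     typed_count = 0
--     for obj in objects:
--         s = obj.get('shape_signature')
--         if s is None:
--             none_count += 1
--         else:
--             typed_count += 1
--             pairs.add((s, obj.get('color')))
--             shapes.add(s)
--     return {
--         'same_color_and_shape': typed_count - len(pairs),
--         'same_shape_only': len(pairs) - len(shapes),
--         'new_generation': len(shapes) + none_count,
--         'total_objects': len(objects),
--     }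
-- ===== Notes on version B (the rewrite author's own statement) =====
-- stated objective: simpler
-- what changed: Replaced A's ordered per-object classification (first-object special case, three branches, two dicts of counts/color-lists) by one aggregate pass collecting a distinct (shape,color)-pair set, a distinct shape set and two counters, then computing all four fields by closed-form arithmetic (same=typed-|pairs|, shape_only=|pairs|-|shapes|, new=|shapes|+none_count).
import Mathlib
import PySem

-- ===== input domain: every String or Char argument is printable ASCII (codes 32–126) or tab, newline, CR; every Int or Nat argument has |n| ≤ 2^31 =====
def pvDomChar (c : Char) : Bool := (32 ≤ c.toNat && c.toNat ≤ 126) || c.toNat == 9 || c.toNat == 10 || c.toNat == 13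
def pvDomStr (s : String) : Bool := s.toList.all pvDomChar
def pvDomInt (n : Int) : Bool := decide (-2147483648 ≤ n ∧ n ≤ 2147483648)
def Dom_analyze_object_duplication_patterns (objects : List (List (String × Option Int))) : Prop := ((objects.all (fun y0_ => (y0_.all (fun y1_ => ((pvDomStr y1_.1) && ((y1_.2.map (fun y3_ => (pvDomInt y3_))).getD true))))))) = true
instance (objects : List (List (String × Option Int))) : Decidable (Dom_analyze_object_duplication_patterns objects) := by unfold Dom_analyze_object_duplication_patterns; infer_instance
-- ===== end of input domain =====

-- B replaces A's ordered per-object branch classification by one aggregate pass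
-- (distinct-pair set, distinct-shape set, two counters) and closed-form arithmetic; objective: simpler.

-- ===== PORT A =====
-- obj.get(k) : missing key or stored None both give None
def pvGetA (obj : List (String × Option Int)) (k : String) : Option Int :=
  ((PySem.Dict.mk obj).getD k none)

-- loop state: (same_color_and_shape, same_shape_only, new_generation, seen_shapes_and_colors, seen_shapes)
def pvAStep (st : Int × Int × Int × PySem.Dict (Int × Option Int) Int × PySem.Dict Int (List (Option Int)))
    (obj : List (String × Option Int)) :
    Int × Int × Int × PySem.Dict (Int × Option Int) Int × PySem.Dict Int (List (Option Int)) :=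
  match st with
  | (same, sonly, newc, dp, ds) =>
    match pvGetA obj "shape_signature" with
    | none => (same, sonly, newc + 1, dp, ds)
    | some s =>
      let c := pvGetA obj "color"
      if dp.contains (s, c) then
        (same + 1, sonly, newc, dp.insert (s, c) (dp.getD (s, c) 0 + 1), ds)
      else if ds.contains s then
        let cols := ds.getD s []
        let ds' := if cols.contains c then ds else ds.insert s (cols ++ [c])
        (same, sonly + 1, newc, dp.insert (s, c) (dp.getD (s, c) 0 + 1), ds')
      else
        (same, sonly, newc + 1, dp.insert (s, c) 1, ds.insert s [c])

def analyze_object_duplication_patterns (objects : List (List (String × Option Int))) : List (String × Int) :=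
  match objects with
  | [] => [("same_color_and_shape", 0), ("same_shape_only", 0), ("new_generation", 0), ("total_objects", 0)]
  | first :: rest =>
    let fs := pvGetA first "shape_signature"
    let fc := pvGetA first "color"
    let dp0 : PySem.Dict (Int × Option Int) Int :=
      match fs with
      | none => PySem.Dict.empty
      | some s => PySem.Dict.empty.insert (s, fc) 1
    let ds0 : PySem.Dict Int (List (Option Int)) :=
      match fs with
      | none => PySem.Dict.empty
      | some s => PySem.Dict.empty.insert s [fc]
    let st := rest.foldl pvAStep (0, 0, 1, dp0, ds0)
    [("same_color_and_shape", st.1), ("same_shape_only", st.2.1),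
     ("new_generation", st.2.2.1), ("total_objects", (objects.length : Int))]

-- ===== PORT B =====
-- loop state: (none_count, typed_count, pairs, shapes)
def pvBStep (st : Int × Int × PySem.Set (Int × Option Int) × PySem.Set Int)
    (obj : List (String × Option Int)) :
    Int × Int × PySem.Set (Int × Option Int) × PySem.Set Int :=
  match st with
  | (nc, tc, P, Sh) =>
    match pvGetA obj "shape_signature" with
    | none => (nc + 1, tc, P, Sh)
    | some s =>
      (nc, tc + 1, PySem.Set.add P (s, pvGetA obj "color"), PySem.Set.add Sh s)

def analyze_object_duplication_patterns_alt (objects : List (List (String × Option Int))) : List (String × Int) :=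
  match objects.foldl pvBStep (0, 0, PySem.Set.empty, PySem.Set.empty) with
  | (nc, tc, P, Sh) =>
    [("same_color_and_shape", tc - (P.length : Int)),
     ("same_shape_only", (P.length : Int) - (Sh.length : Int)),
     ("new_generation", (Sh.length : Int) + nc),
     ("total_objects", (objects.length : Int))]

-- ===== PRECONDITION & SPEC =====
def Spec_analyze_object_duplication_patterns (objects : List (List (String × Option Int))) (out : List (String × Int)) : Prop := out = analyze_object_duplication_patterns_alt objects
instance (objects : List (List (String × Option Int))) (out : List (String × Int)) : Decidable (Spec_analyze_object_duplication_patterns objects out) := by unfold Spec_analyze_object_duplication_patterns; infer_instance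

-- ===== CLAIM (what is proved, stated in full; the proofs are below) =====
def Claim_equal_analyze_object_duplication_patterns : Prop := ∀ (objects : List (List (String × Option Int))), Dom_analyze_object_duplication_patterns objects → Spec_analyze_object_duplication_patterns objects (analyze_object_duplication_patterns objects)

-- ===== LEMMAS AND PROOFS =====

-- The coupled loop invariant: A's dict keys are exactly B's sets (as lists), every seen
-- pair's shape is a seen shape, and A's three counters are B's closed forms.
lemma pv_loop (rest : List (List (String × Option Int))) :
    ∀ (same sonly newc : Int) (dp : PySem.Dict (Int × Option Int) Int)
      (ds : PySem.Dict Int (List (Option Int))) (nc tc : Int)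
      (P : PySem.Set (Int × Option Int)) (Sh : PySem.Set Int),
      dp.keys = P → ds.keys = Sh → (∀ p ∈ P, p.1 ∈ Sh) →
      same = tc - (P.length : Int) →
      sonly = (P.length : Int) - (Sh.length : Int) →
      newc = nc + (Sh.length : Int) →
      ((rest.foldl pvAStep (same, sonly, newc, dp, ds)).1
            = (rest.foldl pvBStep (nc, tc, P, Sh)).2.1
              - (((rest.foldl pvBStep (nc, tc, P, Sh)).2.2.1).length : Int)
        ∧ (rest.foldl pvAStep (same, sonly, newc, dp, ds)).2.1
            = (((rest.foldl pvBStep (nc, tc, P, Sh)).2.2.1).length : Int)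
              - (((rest.foldl pvBStep (nc, tc, P, Sh)).2.2.2).length : Int)
        ∧ (rest.foldl pvAStep (same, sonly, newc, dp, ds)).2.2.1
            = (rest.foldl pvBStep (nc, tc, P, Sh)).1
              + (((rest.foldl pvBStep (nc, tc, P, Sh)).2.2.2).length : Int)) := by
  induction rest with
  | nil =>
    intro same sonly newc dp ds nc tc P Sh hdp hds hPS hsame hsonly hnew
    simp only [List.foldl_nil]
    exact ⟨hsame, hsonly, hnew⟩
  | cons obj rest ih =>
    intro same sonly newc dp ds nc tc P Sh hdp hds hPS hsame hsonly hnew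
    simp only [List.foldl_cons]
    cases hsig : pvGetA obj "shape_signature" with
    | none =>
      simp only [pvAStep, pvBStep, hsig]
      exact ih _ _ _ _ _ _ _ _ _ hdp hds hPS hsame hsonly (by omega)
    | some s =>
      simp only [pvAStep, pvBStep, hsig]
      by_cases hmem : (s, pvGetA obj "color") ∈ P
      · have hc : dp.contains (s, pvGetA obj "color") = true := by
          rw [PySem.Dict.contains_iff_mem_keys, hdp]; exact hmem
        simp only [hc, if_true]
        rw [PySem.Set.add_of_mem hmem, PySem.Set.add_of_mem (hPS _ hmem)]
        exact ih _ _ _ _ _ _ _ _ _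
          (by rw [PySem.Dict.keys_insert_of_contains _ _ hc]; exact hdp)
          hds hPS (by omega) hsonly hnew
      · have hc : dp.contains (s, pvGetA obj "color") = false := by
          rw [Bool.eq_false_iff, Ne, PySem.Dict.contains_iff_mem_keys, hdp]; exact hmem
        simp only [hc, Bool.false_eq_true, if_false]
        rw [PySem.Set.add_of_not_mem hmem]
        by_cases hS : s ∈ Sh
        · have hcs : ds.contains s = true := by
            rw [PySem.Dict.contains_iff_mem_keys, hds]; exact hS
          simp only [hcs, if_true]
          rw [PySem.Set.add_of_mem hS]
          refine ih _ _ _ _ _ _ _ _ _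
            (by rw [PySem.Dict.keys_insert_of_not_contains _ _ hc, hdp])
            ?_ ?_ (by simp; omega) (by simp; omega) hnew
          · split
            · exact hds
            · rw [PySem.Dict.keys_insert_of_contains _ _ hcs]; exact hds
          · intro p hp
            rcases List.mem_append.1 hp with h | h
            · exact hPS _ h
            · simp at h; subst h; exact hS
        · have hcs : ds.contains s = false := by
            rw [Bool.eq_false_iff, Ne, PySem.Dict.contains_iff_mem_keys, hds]; exact hS
          simp only [hcs, Bool.false_eq_true, if_false]
          rw [PySem.Set.add_of_not_mem hS]
          refine ih _ _ _ _ _ _ _ _ _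
            (by rw [PySem.Dict.keys_insert_of_not_contains _ _ hc, hdp])
            (by rw [PySem.Dict.keys_insert_of_not_contains _ _ hcs, hds])
            ?_ (by simp; omega) (by simp; omega) (by simp; omega)
          intro p hp
          rcases List.mem_append.1 hp with h | h
          · exact List.mem_append_left _ (hPS _ h)
          · simp at h; subst h; simp

-- ===== VERDICT (by name: the statement is the Claim_ definition above) =====
theorem analyze_object_duplication_patterns_spec : Claim_equal_analyze_object_duplication_patterns := by
  unfold Claim_equal_analyze_object_duplication_patterns
  intro objects _
  unfold Spec_analyze_object_duplication_patterns
  cases objects with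
  | nil => decide
  | cons first rest =>
    unfold analyze_object_duplication_patterns analyze_object_duplication_patterns_alt
    simp only [List.foldl_cons]
    cases hfs : pvGetA first "shape_signature" with
    | none =>
      simp only [hfs, pvBStep]
      obtain ⟨h1, h2, h3⟩ := pv_loop rest 0 0 1 PySem.Dict.empty PySem.Dict.empty 1 0
        PySem.Set.empty PySem.Set.empty rfl rfl (by intro p hp; cases hp)
        (by norm_num [PySem.Set.empty]) (by norm_num [PySem.Set.empty]) (by norm_num [PySem.Set.empty])
      rw [h1, h2, h3]
      norm_num [Int.add_comm]
    | some s =>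
      simp only [hfs, pvBStep]
      obtain ⟨h1, h2, h3⟩ := pv_loop rest 0 0 1
        (PySem.Dict.empty.insert (s, pvGetA first "color") 1)
        (PySem.Dict.empty.insert s [pvGetA first "color"]) 0 1
        [(s, pvGetA first "color")] [s]
        (by rw [PySem.Dict.keys_insert_of_not_contains _ _ (PySem.Dict.contains_empty _)]; rfl)
        (by rw [PySem.Dict.keys_insert_of_not_contains _ _ (PySem.Dict.contains_empty _)]; rfl)
        (by intro p hp; simp at hp; simp [hp])
        (by simp) (by simp) (by simp)
      rw [h1, h2, h3]
      simp only [PySem.Set.add, PySem.Set.contains]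
      norm_num [Int.add_comm]
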